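-- pv_equiv track=rewrite | github.com/conglambaomat/hihi | CABTA/src/mcp_servers/splunk_tools.py | _collect_entities
-- ===== SOURCE A (Python) =====
-- from typing import Any, Dict, List
--
-- def _collect_entities(results: List[Dict[str, Any]]) -> Dict[str, List[str]]:
--     indicators, files, executables = set(), set(), set()
--     indicator_fields = {"ip", "src_ip", "dest_ip", "dest", "dest_host", "query", "domain", "url", "sha256", "sha1", "md5"}
--     file_fields = {"file_path", "filepath", "targetfilename", "folderpath", "path"}
--     exec_fields = {"image", "process", "process_path", "process_name", "originalfile"}
--
--     for row in results:
--         for key, value in row.items():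
--             text = str(value).strip()
--             if not text:
--                 continue
--             key_l = str(key).lower()
--             if key_l in indicator_fields:
--                 indicators.add(text)
--             if key_l in file_fields and ("/" in text or "\\" in text):
--                 files.add(text)
--             if key_l in exec_fields and text.lower().endswith((".exe", ".dll", ".ps1", ".bat", ".vbs")):
--                 executables.add(text)
--     return {
--         "suspicious_indicators": sorted(indicators)[:50],
--         "suspicious_files": sorted(files)[:50],
--         "suspicious_executables": sorted(executables)[:50],
--     }
-- ===== SOURCE B (Python) =====
-- from typing import Any, Dict, List
--
-- def _collect_entities(results: List[Dict[str, Any]]) -> Dict[str, List[str]]: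
--     indicator_fields = {"ip", "src_ip", "dest_ip", "dest", "dest_host", "query", "domain", "url", "sha256", "sha1", "md5"}
--     file_fields = {"file_path", "filepath", "targetfilename", "folderpath", "path"}
--     exec_fields = {"image", "process", "process_path", "process_name", "originalfile"}
--
--     def scan(keep):
--         return {t for row in results for k, v in row.items()
--                 for t in (str(v).strip(),) if t and keep(str(k).lower(), t)}
--
--     indicators = scan(lambda k, t: k in indicator_fields)
--     files = scan(lambda k, t: k in file_fields and ("/" in t or "\\" in t))
--     executables = scan(lambda k, t: k in exec_fields
--                        and t.lower().endswith((".exe", ".dll", ".ps1", ".bat", ".vbs")))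
--     return {
--         "suspicious_indicators": sorted(indicators)[:50],
--         "suspicious_files": sorted(files)[:50],
--         "suspicious_executables": sorted(executables)[:50],
--     }
-- ===== Notes on version B (the rewrite author's own statement) =====
-- stated objective: idiomatic
-- what changed: Replaces the single combined loop with three-accumulator branching state by three dedicated filtered scans (a shared set-comprehension `scan(keep)` run once per category), each building its set directly from the matching cells.
import Mathlib
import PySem

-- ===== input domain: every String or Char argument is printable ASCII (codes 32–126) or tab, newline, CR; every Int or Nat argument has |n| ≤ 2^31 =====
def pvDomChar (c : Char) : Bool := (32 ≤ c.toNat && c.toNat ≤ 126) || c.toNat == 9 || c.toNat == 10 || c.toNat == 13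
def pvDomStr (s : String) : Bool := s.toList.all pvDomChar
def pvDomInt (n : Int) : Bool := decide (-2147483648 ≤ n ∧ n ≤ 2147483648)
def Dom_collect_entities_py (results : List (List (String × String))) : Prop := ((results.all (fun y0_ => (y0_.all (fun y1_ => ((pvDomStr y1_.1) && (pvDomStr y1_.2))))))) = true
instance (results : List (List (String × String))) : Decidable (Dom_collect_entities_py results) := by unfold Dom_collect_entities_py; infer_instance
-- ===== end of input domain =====

-- B replaces A's single combined loop over three accumulators by three dedicated
-- filtered scans (one per category); objective: idiomatic, same cost.

-- Field-name literals shared by both programs (Python set literals used only for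
-- membership tests, so a list `contains` is exact).
def pvIndicatorFields : List String :=
  ["ip", "src_ip", "dest_ip", "dest", "dest_host", "query", "domain", "url", "sha256", "sha1", "md5"]
def pvFileFields : List String :=
  ["file_path", "filepath", "targetfilename", "folderpath", "path"]
def pvExecFields : List String :=
  ["image", "process", "process_path", "process_name", "originalfile"]

-- text.lower().endswith((".exe", ".dll", ".ps1", ".bat", ".vbs")) — tuple endswith = any of the suffixes
def pvExecSuffix (text : String) : Bool :=
  PySem.Str.endswith (PySem.Str.lower text) ".exe" ||
  PySem.Str.endswith (PySem.Str.lower text) ".dll" ||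
  PySem.Str.endswith (PySem.Str.lower text) ".ps1" ||
  PySem.Str.endswith (PySem.Str.lower text) ".bat" ||
  PySem.Str.endswith (PySem.Str.lower text) ".vbs"

-- ===== PORT A =====
-- the body of A's inner loop over one (key, value) cell, with state (indicators, files, executables)
def pvA_step (st : PySem.Set String × PySem.Set String × PySem.Set String)
    (cell : String × String) : PySem.Set String × PySem.Set String × PySem.Set String :=
  let text := PySem.Str.strip cell.2
  if text = "" then st
  else
    let key_l := PySem.Str.lower cell.1
    ((if pvIndicatorFields.contains key_l then PySem.Set.add st.1 text else st.1),
     (if pvFileFields.contains key_l &&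
          (PySem.Str.isIn "/" text || PySem.Str.isIn "\\" text)
      then PySem.Set.add st.2.1 text else st.2.1),
     (if pvExecFields.contains key_l && pvExecSuffix text
      then PySem.Set.add st.2.2 text else st.2.2))

def collect_entities_py (results : List (List (String × String))) : List (String × List String) :=
  let st := results.foldl (fun st row => row.foldl pvA_step st)
    (PySem.Set.empty, PySem.Set.empty, PySem.Set.empty)
  [("suspicious_indicators", (PySem.List.sorted st.1 (fun x => x) false).take 50),
   ("suspicious_files", (PySem.List.sorted st.2.1 (fun x => x) false).take 50),
   ("suspicious_executables", (PySem.List.sorted st.2.2 (fun x => x) false).take 50)]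

-- ===== PORT B =====
-- scan(keep): a set comprehension over all cells of all rows, kept by `keep key_l text`
def pvB_scan (results : List (List (String × String))) (keep : String → String → Bool) :
    PySem.Set String :=
  PySem.Set.ofList ((results.flatMap (fun row => row)).filterMap (fun cell =>
    let t := PySem.Str.strip cell.2
    if t ≠ "" && keep (PySem.Str.lower cell.1) t then some t else none))

def collect_entities_py_alt (results : List (List (String × String))) : List (String × List String) :=
  let indicators := pvB_scan results (fun k _t => pvIndicatorFields.contains k)
  let files := pvB_scan results (fun k t =>
    pvFileFields.contains k && (PySem.Str.isIn "/" t || PySem.Str.isIn "\\" t))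
  let executables := pvB_scan results (fun k t => pvExecFields.contains k && pvExecSuffix t)
  [("suspicious_indicators", (PySem.List.sorted indicators (fun x => x) false).take 50),
   ("suspicious_files", (PySem.List.sorted files (fun x => x) false).take 50),
   ("suspicious_executables", (PySem.List.sorted executables (fun x => x) false).take 50)]

-- ===== PRECONDITION & SPEC =====
def Spec_collect_entities_py (results : List (List (String × String))) (out : List (String × List String)) : Prop := out = collect_entities_py_alt results
instance (results : List (List (String × String))) (out : List (String × List String)) : Decidable (Spec_collect_entities_py results out) := by unfold Spec_collect_entities_py; infer_instance

-- ===== CLAIM (what is proved, stated in full; the proofs are below) =====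
def Claim_equal_collect_entities_py : Prop := ∀ (results : List (List (String × String))), Dom_collect_entities_py results → Spec_collect_entities_py results (collect_entities_py results)

-- ===== LEMMAS AND PROOFS =====

-- the filter a single keep function induces on one cell
def pvPick (keep : String → String → Bool) (cell : String × String) : Option String :=
  let t := PySem.Str.strip cell.2
  if t ≠ "" && keep (PySem.Str.lower cell.1) t then some t else none

def pvKInd : String → String → Bool := fun k _t => pvIndicatorFields.contains k
def pvKFile : String → String → Bool := fun k t =>
  pvFileFields.contains k && (PySem.Str.isIn "/" t || PySem.Str.isIn "\\" t)
def pvKExec : String → String → Bool := fun k t => pvExecFields.contains k && pvExecSuffix t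

-- one A-step splits into the three per-category filtered add-steps
theorem pvA_step_eq (st : PySem.Set String × PySem.Set String × PySem.Set String)
    (c : String × String) :
    pvA_step st c =
      (((pvPick pvKInd c).toList).foldl PySem.Set.add st.1,
       ((pvPick pvKFile c).toList).foldl PySem.Set.add st.2.1,
       ((pvPick pvKExec c).toList).foldl PySem.Set.add st.2.2) := by
  unfold pvA_step pvPick pvKInd pvKFile pvKExec
  by_cases h : PySem.Str.strip c.2 = "" <;> simp [h]
  split_ifs <;> simp_all

-- the combined fold over a cell list equals the triple of filtered folds
theorem pvFold_cells (cells : List (String × String))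
    (st : PySem.Set String × PySem.Set String × PySem.Set String) :
    cells.foldl pvA_step st =
      ((cells.filterMap (pvPick pvKInd)).foldl PySem.Set.add st.1,
       (cells.filterMap (pvPick pvKFile)).foldl PySem.Set.add st.2.1,
       (cells.filterMap (pvPick pvKExec)).foldl PySem.Set.add st.2.2) := by
  induction cells generalizing st with
  | nil => rfl
  | cons c cs ih =>
    simp only [List.foldl_cons, List.filterMap_cons]
    rw [ih, pvA_step_eq]
    rcases h1 : pvPick pvKInd c <;> rcases h2 : pvPick pvKFile c <;>
      rcases h3 : pvPick pvKExec c <;> simp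

theorem collect_entities_py_spec : Claim_equal_collect_entities_py := by
  intro results _
  show collect_entities_py results = collect_entities_py_alt results
  unfold collect_entities_py collect_entities_py_alt pvB_scan
  have hflat : results.foldl (fun st row => row.foldl pvA_step st)
      (PySem.Set.empty, PySem.Set.empty, PySem.Set.empty)
      = (results.flatMap (fun row => row)).foldl pvA_step
      (PySem.Set.empty, PySem.Set.empty, PySem.Set.empty) := by
    rw [List.foldl_flatMap]
  rw [hflat, pvFold_cells]
  simp only [PySem.Set.ofList_eq_foldl]
  rfl
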